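-- pv_equiv track=rewrite | github.com/alheekmahlib/quran_library | copy_newlines.py | get_word_positions_with_newlines
-- ===== SOURCE A (Python) =====
-- def get_word_positions_with_newlines(text):
--     """
--     تحليل النص وإيجاد مواضع \n بناءً على عدد الكلمات
--     Returns: قائمة بأرقام الكلمات التي يأتي بعدها \n
--     """
--     # تقسيم النص إلى أجزاء بناءً على \n
--     parts = text.split('\n')
--
--     if len(parts) == 1:
--         # لا يوجد \n في النص
--         return []
--
--     newline_positions = []
--     word_count = 0
--
--     # لكل جزء من الأجزاء (عدا الأخير)
--     for i, part in enumerate(parts[:-1]):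
--         # عد الكلمات في هذا الجزء
--         words = part.strip().split()
--         word_count += len(words)
--         # موضع \n يأتي بعد آخر كلمة في هذا الجزء
--         newline_positions.append(word_count)
--
--     return newline_positions
-- ===== SOURCE B (Python) =====
-- def get_word_positions_with_newlines(text):
--     positions = []
--     count = 0
--     in_word = False
--     for ch in text:
--         if ch == '\n':
--             positions.append(count)
--             in_word = False
--         elif ch.isspace():
--             in_word = False
--         elif not in_word:
--             count += 1
--             in_word = True
--     return positions
-- ===== Notes on version B (the rewrite author's own statement) =====
-- stated objective: alternative
-- what changed: Replaces split-on-newline plus per-part strip().split() word counting with a single character-by-character scan that maintains a running word count and an in_word flag, recording the count at each newline; no intermediate lists of parts or words are built.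
import Mathlib
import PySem

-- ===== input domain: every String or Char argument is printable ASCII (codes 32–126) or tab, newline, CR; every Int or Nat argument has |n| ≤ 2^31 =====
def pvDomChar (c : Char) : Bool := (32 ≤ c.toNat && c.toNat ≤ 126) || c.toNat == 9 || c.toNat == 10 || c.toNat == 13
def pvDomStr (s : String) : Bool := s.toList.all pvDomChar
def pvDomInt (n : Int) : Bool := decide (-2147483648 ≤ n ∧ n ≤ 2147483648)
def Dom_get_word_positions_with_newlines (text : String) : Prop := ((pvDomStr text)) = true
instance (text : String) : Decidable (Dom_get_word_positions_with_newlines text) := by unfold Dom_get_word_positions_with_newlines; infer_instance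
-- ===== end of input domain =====

-- B replaces split-on-newline plus per-part strip().split() counting by a single
-- character scan with a running word count and an in_word flag (alternative decomposition, same O(n) cost).

-- ===== PORT A =====
-- literal port of A: split on '\n'; if one part, []; else fold over enumerate(parts[:-1]),
-- adding len(part.strip().split()) to word_count and appending the running total.
def get_word_positions_with_newlines (text : String) : List Int :=
  let parts := PySem.Chars.splitOn text.toList ['\n']
  if parts.length = 1 then []
  else
    ((PySem.List.enumerate (PySem.List.slice parts none (some (-1)))).foldl
      (fun (st : List Int × Int) ip =>
        let words := PySem.Chars.split₀ (PySem.Chars.strip ip.2)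
        (st.1 ++ [st.2 + (words.length : Int)], st.2 + (words.length : Int)))
      ([], 0)).1

-- ===== PORT B =====
-- literal port of B: one pass over the characters with state (positions, count, in_word).
def get_word_positions_with_newlines_alt (text : String) : List Int :=
  (text.toList.foldl
    (fun (st : List Int × Int × Bool) ch =>
      if ch = '\n' then (st.1 ++ [st.2.1], st.2.1, false)
      else if PySem.Chars.isspace ch then (st.1, st.2.1, false)
      else if !st.2.2 then (st.1, st.2.1 + 1, true)
      else st)
    ([], 0, false)).1

-- ===== PRECONDITION & SPEC =====
def Spec_get_word_positions_with_newlines (text : String) (out : List Int) : Prop := out = get_word_positions_with_newlines_alt text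
instance (text : String) (out : List Int) : Decidable (Spec_get_word_positions_with_newlines text out) := by unfold Spec_get_word_positions_with_newlines; infer_instance

-- ===== CLAIM (what is proved, stated in full; the proofs are below) =====
def Claim_equal_get_word_positions_with_newlines : Prop := ∀ (text : String), Dom_get_word_positions_with_newlines text → Spec_get_word_positions_with_newlines text (get_word_positions_with_newlines text)

-- ===== LEMMAS AND PROOFS =====

-- number of split()-words in a char list, given whether a word is in progress
def pvWc : List Char → Bool → Nat
  | [], _ => 0
  | c :: r, inw =>
    if PySem.Chars.isspace c then pvWc r false
    else if inw then pvWc r true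
    else 1 + pvWc r true

-- reference recursion for B's scan: emitted positions from state (count k, in_word inw)
def pvG : List Char → Int → Bool → List Int
  | [], _, _ => []
  | c :: r, k, inw =>
    if c = '\n' then k :: pvG r k false
    else if PySem.Chars.isspace c then pvG r k false
    else if inw then pvG r k true
    else pvG r (k + 1) true

-- reference recursion for split('\n') with reversed-current-part accumulator
def pvSplitNL : List Char → List Char → List (List Char)
  | cur, [] => [cur.reverse]
  | cur, c :: r => if c = '\n' then cur.reverse :: pvSplitNL [] r else pvSplitNL (c :: cur) r

theorem pvSplitNL_ne_nil (cur l : List Char) : pvSplitNL cur l ≠ [] := by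
  induction l generalizing cur with
  | nil => simp [pvSplitNL]
  | cons c r ih => simp only [pvSplitNL]; split_ifs <;> simp [ih]

theorem pvSplitNL_no_nl {l : List Char} (h : '\n' ∉ l) (cur : List Char) :
    pvSplitNL cur l = [cur.reverse ++ l] := by
  induction l generalizing cur with
  | nil => simp [pvSplitNL]
  | cons c r ih =>
    have hc : c ≠ '\n' := fun hh => h (hh ▸ List.mem_cons_self)
    have hr : '\n' ∉ r := fun hh => h (List.mem_cons_of_mem _ hh)
    simp [pvSplitNL, hc, ih hr]

theorem pvSplitNL_append {p : List Char} (h : '\n' ∉ p) (cur rest : List Char) :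
    pvSplitNL cur (p ++ '\n' :: rest) = (cur.reverse ++ p) :: pvSplitNL [] rest := by
  induction p generalizing cur with
  | nil => simp [pvSplitNL]
  | cons c r ih =>
    have hc : c ≠ '\n' := fun hh => h (hh ▸ List.mem_cons_self)
    have hr : '\n' ∉ r := fun hh => h (List.mem_cons_of_mem _ hh)
    simp [pvSplitNL, hc, ih hr]

-- bridge: PySem's fuel-based splitOn on separator ['\n'] is pvSplitNL
theorem pvSplitOn_go (l : List Char) : ∀ (fuel : Nat) (cur : List Char) (acc : List (List Char)),
    l.length < fuel →
    PySem.Chars.splitOn.go ['\n'] fuel l cur acc = acc.reverse ++ pvSplitNL cur l := by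
  induction l with
  | nil =>
    intro fuel cur acc h
    match fuel with
    | f + 1 => simp [PySem.Chars.splitOn.go, pvSplitNL]
  | cons c r ih =>
    intro fuel cur acc h
    match fuel with
    | f + 1 =>
      by_cases hc : c = '\n'
      · subst hc
        have : List.isPrefixOf ['\n'] ('\n' :: r) = true := by simp [List.isPrefixOf]
        simp only [PySem.Chars.splitOn.go, this, if_pos, List.length_cons,
          List.length_nil, List.drop_succ_cons, List.drop_zero]
        rw [ih f [] (cur.reverse :: acc) (by simpa using h)]
        simp [pvSplitNL]
      · have : List.isPrefixOf ['\n'] (c :: r) = false := by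
          simp [List.isPrefixOf]; exact fun hh => hc hh.symm
        simp only [PySem.Chars.splitOn.go, this]
        rw [if_neg (by simp)]
        rw [ih f (c :: cur) acc (by simpa using h)]
        simp [pvSplitNL, hc]

theorem pvSplitOn_eq (cs : List Char) : PySem.Chars.splitOn cs ['\n'] = pvSplitNL [] cs := by
  rw [PySem.Chars.splitOn, pvSplitOn_go cs (cs.length + 1) [] [] (by omega)]
  rfl

-- split₀ counts pvWc many words
theorem pvSplit₀_go_len (p : List Char) : ∀ (cur : List Char) (acc : List (List Char)),
    (PySem.Chars.split₀.go p cur acc).length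
      = acc.length + (if cur.isEmpty then 0 else 1) + pvWc p (!cur.isEmpty) := by
  induction p with
  | nil =>
    intro cur acc
    cases cur <;> simp [PySem.Chars.split₀.go, pvWc]
  | cons c r ih =>
    intro cur acc
    by_cases hs : PySem.Chars.isspace c = true
    · cases cur with
      | nil => simp [PySem.Chars.split₀.go, hs, ih, pvWc]
      | cons a b => simp [PySem.Chars.split₀.go, hs, ih, pvWc]; try omega
    · cases cur with
      | nil => simp [PySem.Chars.split₀.go, hs, ih, pvWc]; try omega
      | cons a b => simp [PySem.Chars.split₀.go, hs, ih, pvWc]; try omega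

theorem pvSplit₀_len (p : List Char) : (PySem.Chars.split₀ p).length = pvWc p false := by
  rw [PySem.Chars.split₀, pvSplit₀_go_len p [] []]; simp

-- stripping does not change the word count
theorem pvWc_spaces {t : List Char} (h : ∀ c ∈ t, PySem.Chars.isspace c = true) (b : Bool) :
    pvWc t b = 0 := by
  induction t generalizing b with
  | nil => rfl
  | cons c r ih =>
    simp [pvWc, h c List.mem_cons_self, ih (fun c hc => h c (List.mem_cons_of_mem _ hc))]

theorem pvWc_append_spaces (a : List Char) {t : List Char}
    (h : ∀ c ∈ t, PySem.Chars.isspace c = true) (b : Bool) :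
    pvWc (a ++ t) b = pvWc a b := by
  induction a generalizing b with
  | nil => simp [pvWc, pvWc_spaces h]
  | cons c r ih => simp only [List.cons_append, pvWc]; split_ifs <;> simp [ih]

theorem pvWc_lstrip (p : List Char) : pvWc (List.dropWhile PySem.Chars.isspace p) false = pvWc p false := by
  induction p with
  | nil => rfl
  | cons c r ih =>
    by_cases hs : PySem.Chars.isspace c = true
    · simp [List.dropWhile, hs, ih, pvWc]
    · simp [List.dropWhile, hs]

theorem pvWc_rstrip (q : List Char) : pvWc (PySem.Chars.rstrip q) false = pvWc q false := by
  have hq : q = PySem.Chars.rstrip q ++ (List.takeWhile PySem.Chars.isspace q.reverse).reverse := by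
    rw [PySem.Chars.rstrip]
    conv_lhs => rw [← List.reverse_reverse q, ← List.takeWhile_append_dropWhile
      (p := PySem.Chars.isspace) (l := q.reverse)]
    rw [List.reverse_append]
  conv_rhs => rw [hq]
  rw [pvWc_append_spaces]
  intro c hc
  rw [List.mem_reverse] at hc
  exact List.mem_takeWhile_imp hc

theorem pvWc_strip (p : List Char) : pvWc (PySem.Chars.strip p) false = pvWc p false := by
  rw [PySem.Chars.strip, pvWc_rstrip, PySem.Chars.lstrip, pvWc_lstrip]

-- decomposition at the first newline
theorem pvFirstNL {cs : List Char} (h : '\n' ∈ cs) :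
    ∃ p rest, cs = p ++ '\n' :: rest ∧ '\n' ∉ p := by
  induction cs with
  | nil => cases h
  | cons c r ih =>
    by_cases hc : c = '\n'
    · exact ⟨[], r, by simp [hc], by simp⟩
    · have hr : '\n' ∈ r := by
        rcases List.mem_cons.mp h with h1 | h1
        · exact absurd h1.symm hc
        · exact h1
      obtain ⟨p, rest, hceq, hnp⟩ := ih hr
      exact ⟨c :: p, rest, by simp [hceq], by
        intro hm
        rcases List.mem_cons.mp hm with h1 | h1
        · exact hc h1.symm
        · exact hnp h1⟩

theorem pvG_no_nl {p : List Char} (h : '\n' ∉ p) (k : Int) (inw : Bool) : pvG p k inw = [] := by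
  induction p generalizing k inw with
  | nil => rfl
  | cons c r ih =>
    have hc : c ≠ '\n' := fun hh => h (hh ▸ List.mem_cons_self)
    have hr : '\n' ∉ r := fun hh => h (List.mem_cons_of_mem _ hh)
    simp only [pvG]; split_ifs <;> first | exact absurd ‹c = '\n'› hc | exact ih hr _ _

theorem pvG_append {p : List Char} (h : '\n' ∉ p) (rest : List Char) (k : Int) (inw : Bool) :
    pvG (p ++ '\n' :: rest) k inw
      = (k + pvWc p inw) :: pvG rest (k + pvWc p inw) false := by
  induction p generalizing k inw with
  | nil => simp [pvG, pvWc]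
  | cons c r ih =>
    have hc : c ≠ '\n' := fun hh => h (hh ▸ List.mem_cons_self)
    have hr : '\n' ∉ r := fun hh => h (List.mem_cons_of_mem _ hh)
    simp only [List.cons_append, pvG, pvWc, hc, if_false]
    split_ifs with h1 h2
    · rw [ih hr]
    · rw [ih hr]
    · rw [ih hr]
      have : (k + 1) + (pvWc r true : Int) = k + ((1 + pvWc r true : Nat) : Int) := by
        push_cast; ring
      rw [this]

theorem pvFoldB (cs : List Char) : ∀ (acc : List Int) (k : Int) (inw : Bool),
    (cs.foldl
      (fun (st : List Int × Int × Bool) ch =>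
        if ch = '\n' then (st.1 ++ [st.2.1], st.2.1, false)
        else if PySem.Chars.isspace ch then (st.1, st.2.1, false)
        else if !st.2.2 then (st.1, st.2.1 + 1, true)
        else st)
      (acc, k, inw)).1 = acc ++ pvG cs k inw := by
  induction cs with
  | nil => intro acc k inw; simp [pvG]
  | cons c r ih =>
    intro acc k inw
    simp only [List.foldl_cons, pvG]
    split_ifs with h1 h2 h3 <;> simp_all

theorem pvFoldA (n : Nat) : ∀ (cs : List Char), cs.length ≤ n →
    ∀ (acc : List Int) (k s : Int),
    ((PySem.List.enumerate ((pvSplitNL [] cs).dropLast) s).foldl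
      (fun (st : List Int × Int) ip =>
        let words := PySem.Chars.split₀ (PySem.Chars.strip ip.2)
        (st.1 ++ [st.2 + (words.length : Int)], st.2 + (words.length : Int)))
      (acc, k)).1 = acc ++ pvG cs k false := by
  induction n with
  | zero =>
    intro cs hlen acc k s
    have : cs = [] := List.length_eq_zero_iff.mp (Nat.le_zero.mp hlen)
    subst this
    simp [pvSplitNL, pvG]
  | succ n ih =>
    intro cs hlen acc k s
    by_cases hm : '\n' ∈ cs
    · obtain ⟨p, rest, rfl, hnp⟩ := pvFirstNL hm
      rw [pvSplitNL_append hnp]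
      simp only [List.reverse_nil, List.nil_append]
      rw [List.dropLast_cons_of_ne_nil (pvSplitNL_ne_nil [] rest)]
      simp only [PySem.List.enumerate, List.foldl_cons]
      rw [ih rest (by simp at hlen; omega) _ _ (s + 1)]
      rw [pvSplit₀_len, pvWc_strip, pvG_append hnp rest k false]
      simp
    · rw [pvSplitNL_no_nl hm]
      simp [pvG_no_nl hm]

theorem pvSlice_dropLast {α : Type} (l : List α) (h : l ≠ []) :
    PySem.List.slice l none (some (-1)) = l.dropLast := by
  have hl : 1 ≤ l.length := List.length_pos_iff.mpr h
  simp only [PySem.List.slice, PySem.List.clampIdx]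
  rw [if_pos (by omega), if_neg (by omega : ¬ ((l.length : Int) + (-1) < 0))]
  rw [List.drop_zero, List.dropLast_eq_take]
  congr 1
  omega

theorem pvLen_one {cs : List Char} (h : (pvSplitNL [] cs).length = 1) : '\n' ∉ cs := by
  intro hm
  obtain ⟨p, rest, rfl, hnp⟩ := pvFirstNL hm
  rw [pvSplitNL_append hnp] at h
  simp only [List.length_cons, Nat.add_eq_one_iff, List.length_eq_zero_iff] at h
  rcases h with ⟨h1, _⟩ | ⟨h1, _⟩
  · exact pvSplitNL_ne_nil [] rest h1
  · omega

-- ===== VERDICT (by name: the statement is the Claim_ definition above) =====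
theorem get_word_positions_with_newlines_spec : Claim_equal_get_word_positions_with_newlines := by
  intro text _
  unfold Spec_get_word_positions_with_newlines get_word_positions_with_newlines get_word_positions_with_newlines_alt
  rw [pvFoldB text.toList [] 0 false]
  simp only [List.nil_append, pvSplitOn_eq]
  split_ifs with h1
  · rw [pvG_no_nl (pvLen_one h1)]
  · rw [pvSlice_dropLast _ (pvSplitNL_ne_nil [] text.toList),
      pvFoldA text.toList.length text.toList le_rfl [] 0 0]
    simp
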